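-- pv_equiv track=rewrite | github.com/arielgindi/ariel-calculator | calculator/preprocessing.py | normalize_expression
-- ===== SOURCE A (Python) =====
-- def normalize_expression(expr: str) -> str:
--     i = 0
--     result = ""
--     length = len(expr)
--     while i < length:
--         c = expr[i]
--         if c == '~':
--             if i == length - 1:
--                 raise ValueError("Invalid usage of '~' at end of expression.")
--             next_char = expr[i+1]
--
--             if next_char.isdigit() or next_char == '(':
--                 # Example: "~5" or "~(3+1)"
--                 # If digit, read the number here to check if there's a factorial next to it.
--                 if next_char.isdigit():
--                     result += '~'
--                     i += 1
--                     # Read the number after '~'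
--                     start = i
--                     while i < length and (expr[i].isdigit() or expr[i] == '.'):
--                         i += 1
--                     number_str = expr[start:i]
--                     # If next char is '!', it's invalid usage of '~' before factorial without parentheses.
--                     if i < length and expr[i] == '!':
--                         raise ValueError("Invalid usage of '~' before factorial without parentheses.")
--                     result += number_str
--                     continue
--                 else:
--                     # next_char == '('
--                     result += '~'
--                     i += 1
--                     continue
--             elif next_char in '+-':
--                 sign = next_char
--                 i += 2
--                 # After ~+ or ~-, we must have a digit immediately
--                 if i >= length or not expr[i].isdigit():
--                     raise ValueError(f"Invalid usage of '~{sign}': no number follows.")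
--                 start = i
--                 while i < length and (expr[i].isdigit() or expr[i] == '.'):
--                     i += 1
--                 number_str = expr[start:i]
--                 # If next char is '!', again invalid without parentheses
--                 if i < length and expr[i] == '!':
--                     raise ValueError("Invalid usage of '~' before factorial without parentheses.")
--                 if sign == '+':
--                     # "~+3" -> "~3"
--                     result += '~' + number_str
--                 else:
--                     # "~-3" -> "~(-3)"
--                     result += '~(' + sign + number_str + ')'
--                 continue
--             elif next_char == '~':
--                 raise ValueError("Multiple consecutive '~' operators without parentheses are not allowed.")
--             else:
--                 raise ValueError("Invalid usage of '~' operator.")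
--         else:
--             result += c
--             i += 1
--     return result
-- ===== SOURCE B (Python) =====
-- def normalize_expression(expr: str) -> str:
--     # Split on '~': every segment after the first was preceded by exactly one '~'.
--     segs = expr.split('~')
--     out = [segs[0]]
--     for k in range(1, len(segs)):
--         s = segs[k]
--         if not s:
--             if k == len(segs) - 1:
--                 raise ValueError("Invalid usage of '~' at end of expression.")
--             raise ValueError("Multiple consecutive '~' operators without parentheses are not allowed.")
--         c = s[0]
--         if c.isdigit():
--             j = 1
--             while j < len(s) and (s[j].isdigit() or s[j] == '.'):
--                 j += 1
--             if j < len(s) and s[j] == '!':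
--                 raise ValueError("Invalid usage of '~' before factorial without parentheses.")
--             out.append('~' + s)
--         elif c == '(':
--             out.append('~' + s)
--         elif c in '+-':
--             if len(s) < 2 or not s[1].isdigit():
--                 raise ValueError(f"Invalid usage of '~{c}': no number follows.")
--             j = 2
--             while j < len(s) and (s[j].isdigit() or s[j] == '.'):
--                 j += 1
--             if j < len(s) and s[j] == '!':
--                 raise ValueError("Invalid usage of '~' before factorial without parentheses.")
--             if c == '+':
--                 out.append('~' + s[1:])
--             else:
--                 out.append('~(' + '-' + s[1:j] + ')' + s[j:])
--         else:
--             raise ValueError("Invalid usage of '~' operator.")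
--     return ''.join(out)
-- ===== Notes on version B (the rewrite author's own statement) =====
-- stated objective: alternative
-- what changed: A walks the string with a manual index in one while loop with inner number-scanning loops; B instead splits the string on '~' once and validates/decorates each resulting segment independently, joining the pieces at the end.
import Mathlib
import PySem

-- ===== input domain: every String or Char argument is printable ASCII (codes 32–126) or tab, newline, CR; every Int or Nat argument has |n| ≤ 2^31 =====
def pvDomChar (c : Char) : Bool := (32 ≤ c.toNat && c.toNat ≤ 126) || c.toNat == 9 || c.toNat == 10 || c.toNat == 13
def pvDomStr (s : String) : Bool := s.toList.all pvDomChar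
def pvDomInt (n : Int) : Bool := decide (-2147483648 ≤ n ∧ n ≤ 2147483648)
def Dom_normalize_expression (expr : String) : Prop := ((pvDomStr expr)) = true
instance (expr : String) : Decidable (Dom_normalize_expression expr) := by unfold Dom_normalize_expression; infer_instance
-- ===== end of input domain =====

-- B normalizes '~' by splitting the string on '~' once and handling each segment on its own,
-- where A walks the string with a manual index; equal return values proved on Pre_ (the inputs
-- on which A does not raise ValueError).

-- ===== PORT A =====

-- A's inner `while i < length and (expr[i].isdigit() or expr[i] == '.')` scan: returns the
-- scanned digits/dots and the remaining suffix.
def spanNumA : List Char → List Char × List Char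
  | [] => ([], [])
  | c :: t =>
    if PySem.Chars.isdigit c || c = '.' then
      let p := spanNumA t
      (c :: p.1, p.2)
    else ([], c :: t)

-- A's outer while loop, one recursive step per iteration; the fuel argument (length of the
-- string is always enough, each iteration consumes at least one character) only makes the
-- recursion structural.  On the inputs where Python raises ValueError (excluded by Pre_)
-- the port returns [].
def goA : Nat → List Char → List Char
  | 0, _ => []
  | _ + 1, [] => []
  | f + 1, c :: rest =>
    if c = '~' then
      match rest with
      | [] => []  -- raise: '~' at end of expression
      | n :: rest2 =>
        if PySem.Chars.isdigit n then
          let p := spanNumA (n :: rest2)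
          match p.2 with
          | '!' :: _ => []  -- raise: '~' before factorial
          | _ => '~' :: p.1 ++ goA f p.2
        else if n = '(' then
          '~' :: goA f (n :: rest2)
        else if n = '+' || n = '-' then
          match rest2 with
          | [] => []  -- raise: no number follows
          | d :: rest3 =>
            if PySem.Chars.isdigit d then
              let p := spanNumA (d :: rest3)
              match p.2 with
              | '!' :: _ => []  -- raise: '~' before factorial
              | _ =>
                if n = '+' then '~' :: p.1 ++ goA f p.2
                else '~' :: '(' :: n :: p.1 ++ ')' :: goA f p.2
            else []  -- raise: no number follows
        else []  -- raise: consecutive '~' / invalid usage of '~'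
    else c :: goA f rest

def normalize_expression (expr : String) : String :=
  String.ofList (goA expr.toList.length expr.toList)

-- ===== PORT B =====

-- Source B's `expr.split('~')`, ported by hand (exact for the one-character separator '~'):
-- first piece, and the list of later pieces.
def splitTilde : List Char → List Char × List (List Char)
  | [] => ([], [])
  | c :: t =>
    let p := splitTilde t
    if c = '~' then ([], p.1 :: p.2) else (c :: p.1, p.2)

-- Source B's `while j < len(s) and (s[j].isdigit() or s[j] == '.')` counter.
def ddRun : List Char → Nat
  | [] => 0
  | c :: t => if PySem.Chars.isdigit c || c = '.' then ddRun t + 1 else 0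

-- Source B's loop body for one segment s (the text between two '~'); none = the raise branches.
def procSegB : List Char → Option (List Char)
  | [] => none  -- raise: '~' at end / consecutive '~'
  | c :: t =>
    if PySem.Chars.isdigit c then
      match t.drop (ddRun t) with
      | '!' :: _ => none  -- raise: '~' before factorial
      | _ => some ('~' :: c :: t)
    else if c = '(' then some ('~' :: c :: t)
    else if c = '+' || c = '-' then
      match t with
      | [] => none  -- raise: no number follows
      | d :: _ =>
        if PySem.Chars.isdigit d then
          match t.drop (ddRun t) with
          | '!' :: _ => none  -- raise: '~' before factorial
          | _ =>
            if c = '+' then some ('~' :: t)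
            else some ('~' :: '(' :: '-' :: (t.take (ddRun t) ++ ')' :: t.drop (ddRun t)))
        else none  -- raise: no number follows
    else none  -- raise: invalid usage of '~'

def normB (cs : List Char) : List Char :=
  match (splitTilde cs).2.mapM procSegB with
  | none => []  -- a raise in Source B; excluded by Pre_
  | some parts => (splitTilde cs).1 ++ parts.flatten

def normalize_expression_alt (expr : String) : String := String.ofList (normB expr.toList)

-- ===== PRECONDITION & SPEC =====

-- no '!' immediately after the leading digits/dots run
def noBang (cs : List Char) : Bool :=
  match cs.drop (ddRun cs) with
  | '!' :: _ => false
  | _ => true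

-- is the text following one '~' acceptable to A?
def validTail : List Char → Bool
  | [] => false
  | c :: t =>
    if PySem.Chars.isdigit c then noBang (c :: t)
    else if c = '(' then true
    else if c = '+' || c = '-' then
      match t with
      | [] => false
      | d :: _ => PySem.Chars.isdigit d && noBang t
    else false

def PreL (cs : List Char) : Prop :=
  ∀ i < cs.length, cs.getD i ' ' = '~' → validTail (cs.drop (i + 1)) = true

-- exactly the inputs on which Python A returns (every '~' is followed by a valid construct);
-- on all others A raises ValueError.
def Pre_normalize_expression (expr : String) : Prop := PreL expr.toList

instance (expr : String) : Decidable (Pre_normalize_expression expr) := by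
  unfold Pre_normalize_expression PreL; infer_instance

def pvWitness_normalize_expression : String := "~5+~-2.5*~(1+2)"

def Spec_normalize_expression (expr : String) (out : String) : Prop := out = normalize_expression_alt expr
instance (expr : String) (out : String) : Decidable (Spec_normalize_expression expr out) := by unfold Spec_normalize_expression; infer_instance

-- ===== CLAIM (what is proved, stated in full; the proofs are below) =====
def Claim_equal_normalize_expression : Prop := ∀ (expr : String), Dom_normalize_expression expr → Pre_normalize_expression expr → Spec_normalize_expression expr (normalize_expression expr)

-- ===== LEMMAS AND PROOFS =====

theorem ddRun_le_length : ∀ t : List Char, ddRun t ≤ t.length := by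
  intro t
  induction t with
  | nil => simp [ddRun]
  | cons c t ih => simp only [ddRun]; split <;> simp <;> omega

theorem spanNumA_eq : ∀ t : List Char, spanNumA t = (t.take (ddRun t), t.drop (ddRun t)) := by
  intro t
  induction t with
  | nil => simp [spanNumA, ddRun]
  | cons c t ih =>
    simp only [spanNumA, ddRun]
    split
    · simp [ih]
    · simp

theorem take_ddRun_dd : ∀ t : List Char, ∀ c ∈ t.take (ddRun t),
    (PySem.Chars.isdigit c || c = '.') = true := by
  intro t
  induction t with
  | nil => simp [ddRun]
  | cons c t ih =>
    simp only [ddRun]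
    split
    · intro x hx
      rw [List.take_succ_cons] at hx
      rcases List.mem_cons.1 hx with h | h
      · subst h; assumption
      · exact ih x h
    · simp

theorem drop_ddRun_not_dd : ∀ (t : List Char) (x : Char) (xs : List Char),
    t.drop (ddRun t) = x :: xs → (PySem.Chars.isdigit x || x = '.') = false := by
  intro t
  induction t with
  | nil => intro x xs h; simp [ddRun] at h
  | cons c t ih =>
    intro x xs h
    simp only [ddRun] at h
    by_cases hc : (PySem.Chars.isdigit c || c = '.') = true
    · rw [if_pos hc] at h
      rw [List.drop_succ_cons] at h
      exact ih x xs h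
    · rw [if_neg hc, List.drop_zero] at h
      injection h with h1 h2
      subst h1
      exact Bool.of_not_eq_true hc

theorem splitTilde_fst_prefix : ∀ cs : List Char, (splitTilde cs).1 <+: cs := by
  intro cs
  induction cs with
  | nil => simp [splitTilde]
  | cons c t ih =>
    simp only [splitTilde]
    split
    · simp
    · simpa [List.cons_prefix_cons] using ih

theorem splitTilde_append : ∀ a b : List Char, (∀ c ∈ a, c ≠ '~') →
    splitTilde (a ++ b) = (a ++ (splitTilde b).1, (splitTilde b).2) := by
  intro a
  induction a with
  | nil => intro b _; simp
  | cons c a ih =>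
    intro b ha
    have hc : c ≠ '~' := ha c (List.mem_cons_self ..)
    simp only [List.cons_append, splitTilde, if_neg hc,
      ih b (fun x hx => ha x (List.mem_cons_of_mem _ hx))]

theorem ddRun_append : ∀ a b : List Char,
    (∀ c ∈ a, (PySem.Chars.isdigit c || c = '.') = true) →
    (∀ x xs, b = x :: xs → (PySem.Chars.isdigit x || x = '.') = false) →
    ddRun (a ++ b) = a.length := by
  intro a
  induction a with
  | nil =>
    intro b _ hb
    cases b with
    | nil => simp [ddRun]
    | cons x xs => simp [ddRun, hb x xs rfl]
  | cons c a ih =>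
    intro b ha hb
    simp only [List.cons_append, ddRun, if_pos (ha c (List.mem_cons_self ..)),
      ih b (fun x hx => ha x (List.mem_cons_of_mem _ hx)) hb]
    simp

theorem PreL_drop (cs : List Char) (h : PreL cs) (k : Nat) : PreL (cs.drop k) := by
  intro i hi hm
  have hlen : k + i < cs.length := by
    simp [List.length_drop] at hi; omega
  have hget : (cs.drop k).getD i ' ' = cs.getD (k + i) ' ' := by
    simp [List.getD_eq_getElem?_getD, List.getElem?_drop]
  have hv := h (k + i) hlen (by rw [← hget]; exact hm)
  have heq : (cs.drop k).drop (i + 1) = cs.drop (k + (i + 1)) := by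
    rw [List.drop_drop]
  rw [heq, show k + (i + 1) = k + i + 1 from by omega]
  exact hv

-- the per-'~'-segment bridge used by every branch of the main induction: the first
-- segment of t2 decomposes as number-run ++ first segment after the run, and B's
-- j-scan inside that segment stops exactly at the run's end
theorem not_dd_segHead (t2 : List Char) : ∀ x xs,
    (splitTilde (t2.drop (ddRun t2))).1 = x :: xs → (PySem.Chars.isdigit x || x = '.') = false := by
  intro x xs hx
  have hp := splitTilde_fst_prefix (t2.drop (ddRun t2))
  rw [hx] at hp
  obtain ⟨s, hs⟩ := hp
  exact drop_ddRun_not_dd t2 x (xs ++ s) (by rw [← hs]; simp)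

theorem seg_facts (t2 : List Char) :
    (splitTilde t2).1 = t2.take (ddRun t2) ++ (splitTilde (t2.drop (ddRun t2))).1 ∧
    (splitTilde t2).2 = (splitTilde (t2.drop (ddRun t2))).2 ∧
    ddRun (t2.take (ddRun t2) ++ (splitTilde (t2.drop (ddRun t2))).1) = ddRun t2 := by
  have hnum := take_ddRun_dd t2
  have hnotilde : ∀ c ∈ t2.take (ddRun t2), c ≠ '~' := by
    intro c hc he
    have h1 := hnum c hc
    rw [he] at h1
    exact absurd h1 (by decide)
  have hsplit := splitTilde_append (t2.take (ddRun t2)) (t2.drop (ddRun t2)) hnotilde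
  rw [List.take_append_drop] at hsplit
  refine ⟨by rw [hsplit], by rw [hsplit], ?_⟩
  rw [ddRun_append _ _ hnum (not_dd_segHead t2)]
  simp [List.length_take, Nat.min_eq_left (ddRun_le_length t2)]

theorem take_len_ddRun (t2 : List Char) : (t2.take (ddRun t2)).length = ddRun t2 := by
  simp [List.length_take, Nat.min_eq_left (ddRun_le_length t2)]

theorem seg_drop (t2 : List Char) :
    (t2.take (ddRun t2) ++ (splitTilde (t2.drop (ddRun t2))).1).drop (ddRun t2)
      = (splitTilde (t2.drop (ddRun t2))).1 := by
  exact List.drop_left' (take_len_ddRun t2)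

theorem seg_take (t2 : List Char) :
    (t2.take (ddRun t2) ++ (splitTilde (t2.drop (ddRun t2))).1).take (ddRun t2)
      = t2.take (ddRun t2) := by
  exact List.take_left' (take_len_ddRun t2)

theorem seg_nobang (t2 : List Char) (hnb : ∀ l, t2.drop (ddRun t2) ≠ '!' :: l) :
    ∀ l, (splitTilde (t2.drop (ddRun t2))).1 ≠ '!' :: l := by
  intro l hx
  have hp := splitTilde_fst_prefix (t2.drop (ddRun t2))
  rw [hx] at hp
  obtain ⟨s, hs⟩ := hp
  exact hnb (l ++ s) (by rw [← hs]; simp)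

theorem splitTilde_tilde (t : List Char) :
    splitTilde ('~' :: t) = ([], (splitTilde t).1 :: (splitTilde t).2) := by
  simp [splitTilde]

theorem splitTilde_cons_ne (c : Char) (t : List Char) (hc : c ≠ '~') :
    splitTilde (c :: t) = (c :: (splitTilde t).1, (splitTilde t).2) := by
  simp [splitTilde, hc]

theorem noBang_elim (t2 : List Char) (h : noBang t2 = true) :
    ∀ l, t2.drop (ddRun t2) ≠ '!' :: l := by
  intro l hl
  simp only [noBang, hl] at h
  simp at h

theorem noBang_cons_elim (n : Char) (t2 : List Char)
    (hdd : (PySem.Chars.isdigit n || n = '.') = true)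
    (h : noBang (n :: t2) = true) : ∀ l, t2.drop (ddRun t2) ≠ '!' :: l := by
  intro l hl
  simp only [noBang, ddRun, if_pos hdd, List.drop_succ_cons, hl] at h
  simp at h

theorem mainAux : ∀ (f : Nat) (cs : List Char), cs.length ≤ f → PreL cs →
    ∃ ps, (splitTilde cs).2.mapM procSegB = some ps ∧
      (splitTilde cs).1 ++ ps.flatten = goA f cs := by
  intro f
  induction f with
  | zero =>
    intro cs hle _
    have hnil : cs = [] := List.eq_nil_of_length_eq_zero (by omega)
    subst hnil
    exact ⟨[], by simp [splitTilde, goA]⟩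
  | succ f ih =>
    intro cs hle hpre
    match cs with
    | [] => exact ⟨[], by simp [splitTilde, goA]⟩
    | c :: t =>
      by_cases hc : c = '~'
      case neg =>
        -- ordinary character: copied through by both programs
        have hpt : PreL t := by
          have h1 := PreL_drop _ hpre 1
          simpa using h1
        obtain ⟨ps, hmap, hflat⟩ := ih t (by simp at hle; omega) hpt
        refine ⟨ps, ?_, ?_⟩
        · rw [splitTilde_cons_ne c t hc]; exact hmap
        · rw [splitTilde_cons_ne c t hc]
          simp only [goA, if_neg hc]
          simp [hflat]
      case pos =>
        subst hc
        have hvt : validTail t = true := by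
          have h0 := hpre 0 (by simp) (by simp)
          simpa using h0
        match t with
        | [] => simp [validTail] at hvt
        | n :: t2 =>
          have hle2 : t2.length + 2 ≤ f + 1 := by simpa using hle
          by_cases hn : PySem.Chars.isdigit n = true
          case pos =>
            -- '~' followed by a number
            have hddn : (PySem.Chars.isdigit n || n = '.') = true := by simp [hn]
            have hnbt : noBang (n :: t2) = true := by
              simpa [validTail, hn] using hvt
            have hnb := noBang_cons_elim n t2 hddn hnbt
            have hpre3 : PreL (t2.drop (ddRun t2)) := by
              have h1 := PreL_drop _ hpre (ddRun t2 + 2)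
              have he : ('~' :: n :: t2).drop (ddRun t2 + 2) = t2.drop (ddRun t2) := by
                rw [show ddRun t2 + 2 = (ddRun t2 + 1) + 1 from rfl]
                simp [List.drop_succ_cons]
              rwa [he] at h1
            have hlen3 : (t2.drop (ddRun t2)).length ≤ f := by
              simp [List.length_drop]; omega
            obtain ⟨ps', hmap', hflat'⟩ := ih (t2.drop (ddRun t2)) hlen3 hpre3
            obtain ⟨hs1, hs2, hsr⟩ := seg_facts t2
            have hntilde : n ≠ '~' := by
              intro he; rw [he] at hn; exact absurd hn (by decide)
            have hrr : ddRun (n :: t2) = ddRun t2 + 1 := by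
              simp [ddRun, hddn]
            have hspan : spanNumA (n :: t2) = (n :: t2.take (ddRun t2), t2.drop (ddRun t2)) := by
              rw [spanNumA_eq, hrr]
              simp [List.take_succ_cons, List.drop_succ_cons]
            have hA : goA (f + 1) ('~' :: n :: t2)
                = '~' :: (n :: t2.take (ddRun t2)) ++ goA f (t2.drop (ddRun t2)) := by
              simp only [goA]
              simp [hspan, hn]
            have hproc : procSegB (n :: (splitTilde t2).1)
                = some ('~' :: n :: (splitTilde t2).1) := by
              rw [hs1]
              simp only [procSegB]
              simp [hn, hsr, seg_drop t2]
              split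
              · rename_i heq
                exact absurd heq (seg_nobang t2 hnb _)
              · rfl
            refine ⟨('~' :: n :: (splitTilde t2).1) :: ps', ?_, ?_⟩
            · rw [splitTilde_tilde, splitTilde_cons_ne n t2 hntilde]
              simp only [List.mapM_cons, hproc, hs2, hmap']
              rfl
            · rw [splitTilde_tilde, splitTilde_cons_ne n t2 hntilde, hA]
              simp only [List.nil_append, List.flatten_cons]
              rw [hs1, ← hflat']
              simp
          case neg =>
            by_cases hp : n = '('
            case pos =>
              -- '~(' : the '~' is copied, the '(' handled normally
              subst hp
              have hfig : PySem.Chars.isdigit '(' = false := by decide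
              have hpt : PreL ('(' :: t2) := by
                have h1 := PreL_drop _ hpre 1
                simpa using h1
              obtain ⟨ps', hmap', hflat'⟩ := ih ('(' :: t2) (by simp; omega) hpt
              have hs := splitTilde_cons_ne '(' t2 (by decide)
              have hproc : procSegB ('(' :: (splitTilde t2).1)
                  = some ('~' :: '(' :: (splitTilde t2).1) := by
                simp [procSegB, hfig]
              have hA : goA (f + 1) ('~' :: '(' :: t2) = '~' :: goA f ('(' :: t2) := by
                simp only [goA]
                simp [hfig]
              refine ⟨('~' :: '(' :: (splitTilde t2).1) :: ps', ?_, ?_⟩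
              · rw [splitTilde_tilde, hs]
                simp only [List.mapM_cons, hproc]
                rw [hs] at hmap'
                simp only [hmap']
                rfl
              · rw [splitTilde_tilde, hA, ← hflat', hs]
                simp
            case neg =>
              by_cases hpm : n = '+' ∨ n = '-'
              case pos =>
                -- '~+number' / '~-number'
                have hfin : PySem.Chars.isdigit n = false := Bool.of_not_eq_true hn
                match t2 with
                | [] =>
                  exfalso
                  rcases hpm with h | h <;> subst h <;>
                    simp [validTail, show PySem.Chars.isdigit '+' = false from by decide,
                      show PySem.Chars.isdigit '-' = false from by decide] at hvt
                | d :: t3 =>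
                  have hdn : (PySem.Chars.isdigit d && noBang (d :: t3)) = true := by
                    rcases hpm with h | h <;> subst h <;>
                      simpa [validTail, show PySem.Chars.isdigit '+' = false from by decide,
                        show PySem.Chars.isdigit '-' = false from by decide] using hvt
                  rw [Bool.and_eq_true] at hdn
                  obtain ⟨hd, hnb2⟩ := hdn
                  have hddd : (PySem.Chars.isdigit d || d = '.') = true := by simp [hd]
                  have hnb := noBang_elim (d :: t3) hnb2
                  have hpre3 : PreL ((d :: t3).drop (ddRun (d :: t3))) := by
                    have h1 := PreL_drop _ hpre (ddRun (d :: t3) + 2)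
                    have he : ('~' :: n :: d :: t3).drop (ddRun (d :: t3) + 2)
                        = (d :: t3).drop (ddRun (d :: t3)) := by
                      rw [show ddRun (d :: t3) + 2 = (ddRun (d :: t3) + 1) + 1 from rfl]
                      simp [List.drop_succ_cons]
                    rwa [he] at h1
                  have hlen3 : ((d :: t3).drop (ddRun (d :: t3))).length ≤ f := by
                    simp [List.length_drop] at *; omega
                  obtain ⟨ps', hmap', hflat'⟩ := ih _ hlen3 hpre3
                  obtain ⟨hs1, hs2, hsr⟩ := seg_facts (d :: t3)
                  have hspan : spanNumA (d :: t3)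
                      = ((d :: t3).take (ddRun (d :: t3)), (d :: t3).drop (ddRun (d :: t3))) :=
                    spanNumA_eq (d :: t3)
                  have htk : (d :: t3).take (ddRun (d :: t3)) = d :: t3.take (ddRun t3) := by
                    simp [ddRun, hddd, List.take_succ_cons]
                  -- the segment after this '~', exposed as a cons
                  have hXl : (splitTilde (d :: t3)).1
                      = d :: (t3.take (ddRun t3)
                          ++ (splitTilde ((d :: t3).drop (ddRun (d :: t3)))).1) := by
                    rw [hs1, htk]; simp
                  have hRunX : ddRun (d :: (t3.take (ddRun t3)
                      ++ (splitTilde ((d :: t3).drop (ddRun (d :: t3)))).1))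
                      = ddRun (d :: t3) := by
                    rw [← List.cons_append, ← htk]; exact hsr
                  have hDropX : (d :: (t3.take (ddRun t3)
                      ++ (splitTilde ((d :: t3).drop (ddRun (d :: t3)))).1)).drop (ddRun (d :: t3))
                      = (splitTilde ((d :: t3).drop (ddRun (d :: t3)))).1 := by
                    rw [← List.cons_append, ← htk]; exact seg_drop (d :: t3)
                  have hTakeX : (d :: (t3.take (ddRun t3)
                      ++ (splitTilde ((d :: t3).drop (ddRun (d :: t3)))).1)).take (ddRun (d :: t3))
                      = (d :: t3).take (ddRun (d :: t3)) := by
                    rw [← List.cons_append, ← htk]; exact seg_take (d :: t3)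
                  have hnbh := seg_nobang (d :: t3) hnb
                  rcases hpm with hsn | hsn
                  all_goals subst hsn
                  -- '~+number' → '~number'
                  · have hA : goA (f + 1) ('~' :: '+' :: d :: t3)
                        = '~' :: (d :: t3).take (ddRun (d :: t3))
                          ++ goA f ((d :: t3).drop (ddRun (d :: t3))) := by
                      simp only [goA]
                      simp [hd, hspan, show PySem.Chars.isdigit '+' = false from by decide]
                    have hproc : procSegB ('+' :: (splitTilde (d :: t3)).1)
                        = some ('~' :: (splitTilde (d :: t3)).1) := by
                      rw [hXl]
                      simp only [procSegB]
                      simp [hd, hRunX, hDropX, show PySem.Chars.isdigit '+' = false from by decide]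
                    refine ⟨('~' :: (splitTilde (d :: t3)).1) :: ps', ?_, ?_⟩
                    · rw [splitTilde_tilde, splitTilde_cons_ne '+' _ (by decide)]
                      simp only [List.mapM_cons, hproc, hs2, hmap']
                      rfl
                    · rw [splitTilde_tilde, splitTilde_cons_ne '+' _ (by decide), hA]
                      simp only [List.nil_append, List.flatten_cons]
                      rw [hs1, ← hflat']
                      simp
                  -- '~-number' → '~(-number)'
                  · have hA : goA (f + 1) ('~' :: '-' :: d :: t3)
                        = '~' :: '(' :: '-' :: (d :: t3).take (ddRun (d :: t3))
                          ++ ')' :: goA f ((d :: t3).drop (ddRun (d :: t3))) := by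
                      simp only [goA]
                      simp [hd, hspan, show PySem.Chars.isdigit '-' = false from by decide]
                    have hproc : procSegB ('-' :: (splitTilde (d :: t3)).1)
                        = some ('~' :: '(' :: '-' :: ((d :: t3).take (ddRun (d :: t3))
                          ++ ')' :: (splitTilde ((d :: t3).drop (ddRun (d :: t3)))).1)) := by
                      rw [hXl]
                      simp only [procSegB]
                      simp [hd, hRunX, hDropX, hTakeX, show PySem.Chars.isdigit '-' = false from by decide]
                    refine ⟨('~' :: '(' :: '-' :: ((d :: t3).take (ddRun (d :: t3))
                      ++ ')' :: (splitTilde ((d :: t3).drop (ddRun (d :: t3)))).1)) :: ps', ?_, ?_⟩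
                    · rw [splitTilde_tilde, splitTilde_cons_ne '-' _ (by decide)]
                      simp only [List.mapM_cons, hproc, hs2, hmap']
                      rfl
                    · rw [splitTilde_tilde, splitTilde_cons_ne '-' _ (by decide), hA]
                      simp only [List.nil_append, List.flatten_cons]
                      rw [← hflat']
                      simp
              case neg =>
                -- contradiction: A would raise here
                have hfin : PySem.Chars.isdigit n = false := Bool.of_not_eq_true hn
                have h1 : n ≠ '+' := fun h => hpm (Or.inl h)
                have h2 : n ≠ '-' := fun h => hpm (Or.inr h)
                simp [validTail, hfin, hp, h1, h2] at hvt

theorem normB_eq_goA (cs : List Char) (h : PreL cs) : normB cs = goA cs.length cs := by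
  obtain ⟨ps, hmap, hflat⟩ := mainAux cs.length cs le_rfl h
  simp [normB, hmap, hflat]

-- ===== VERDICT (by name: the statement is the Claim_ definition above) =====
theorem normalize_expression_spec : Claim_equal_normalize_expression := by
  intro expr _ hpre
  unfold Spec_normalize_expression normalize_expression normalize_expression_alt
  rw [normB_eq_goA expr.toList hpre]
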